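-- pv_equiv track=rewrite | github.com/hyeongyun0916/Algorithm | etc/zigzag.py | solution
-- ===== SOURCE A (Python) =====
-- def getMark(n):
--     if n > 0:
--         return 1
--     elif n == 0:
--         return 0
--     else:
--         return -1
--
-- def isPossible(arr):
--     if len(arr) < 3:
--         return 1
--     for i in range(0, len(arr)-2):
--         if arr[i] == arr[i+1]:
--             return 0
--         if getMark(arr[i]-arr[i+1])*-1 != getMark(arr[i+1]-arr[i+2]):
--             return 0
--     return 1
--
-- def solution(arr):
--     stranges = []
--     for i in range(len(arr)-2):
--         if arr[i] == arr[i+1]: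
--             stranges.append(i+1)
--             continue
--         if getMark(arr[i]-arr[i+1])*-1 != getMark(arr[i+1]-arr[i+2]):
--             stranges.append(i+1)
--
--     if len(stranges) == 0:
--         return 0
--
--     if len(stranges) == 2:
--         if stranges[0]+1 != stranges[1]:
--             return -1
--
--     if len(stranges) > 2:
--         return -1
--
--     answer = 0
--
--     newArr = arr[max(stranges[0]-2,0):min(stranges[-1]+3, len(arr))]
--
--     for i in range(len(newArr)):
--         answer += isPossible(newArr[:i]+newArr[i+1:])
--
--     return -1 if answer == 0 else answer
-- ===== SOURCE B (Python) =====
-- def isZigzag(a):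
--     # every interior element is a strict peak or valley
--     return all(x < y > z or x > y < z for x, y, z in zip(a, a[1:], a[2:]))
--
-- def solution(arr):
--     if isZigzag(arr):
--         return 0
--     answer = sum(1 for i in range(len(arr)) if isZigzag(arr[:i] + arr[i+1:]))
--     return -1 if answer == 0 else answer
-- ===== Notes on version B (the rewrite author's own statement) =====
-- stated objective: simpler
-- what changed: Replaces A's stranges-index bookkeeping, adjacency/count case analysis and windowed slice with a uniform brute force: a single isZigzag helper plus try-every-single-removal counting over the whole array.
import Mathlib
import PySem

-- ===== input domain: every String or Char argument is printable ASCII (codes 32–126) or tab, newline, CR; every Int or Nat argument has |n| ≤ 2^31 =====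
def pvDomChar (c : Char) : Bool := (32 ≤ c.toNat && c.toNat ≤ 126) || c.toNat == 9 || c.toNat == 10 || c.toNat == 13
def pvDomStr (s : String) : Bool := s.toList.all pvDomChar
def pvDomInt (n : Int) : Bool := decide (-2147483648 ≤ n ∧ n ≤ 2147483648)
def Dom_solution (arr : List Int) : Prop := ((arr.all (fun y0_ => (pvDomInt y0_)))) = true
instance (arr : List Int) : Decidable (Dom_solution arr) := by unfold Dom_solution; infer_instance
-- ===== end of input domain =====

-- B replaces A's stranges-index/window bookkeeping by a uniform try-every-single-removal
-- brute force with one isZigzag helper (objective: simpler; not faster).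


-- ===== PORT A =====
def getMark (n : Int) : Int := if n > 0 then 1 else if n = 0 then 0 else -1

-- the loop of isPossible, with Python's early 'return 0' as recursion over the index list
def isPossibleGo (a : List Int) : List Int → Int
  | [] => 1
  | i :: rest =>
    if PySem.List.pyGetD a i 0 = PySem.List.pyGetD a (i + 1) 0 then 0
    else if getMark (PySem.List.pyGetD a i 0 - PySem.List.pyGetD a (i + 1) 0) * (-1)
        ≠ getMark (PySem.List.pyGetD a (i + 1) 0 - PySem.List.pyGetD a (i + 2) 0) then 0
    else isPossibleGo a rest

def isPossible (a : List Int) : Int :=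
  if (a.length : Int) < 3 then 1
  else isPossibleGo a (PySem.List.pyRange 0 ((a.length : Int) - 2) 1)

def solution (arr : List Int) : Int :=
  let stranges : List Int :=
    (PySem.List.pyRange 0 ((arr.length : Int) - 2) 1).foldl (fun st i =>
      if PySem.List.pyGetD arr i 0 = PySem.List.pyGetD arr (i + 1) 0 then st ++ [i + 1]
      else if getMark (PySem.List.pyGetD arr i 0 - PySem.List.pyGetD arr (i + 1) 0) * (-1)
          ≠ getMark (PySem.List.pyGetD arr (i + 1) 0 - PySem.List.pyGetD arr (i + 2) 0) then st ++ [i + 1]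
      else st) []
  if stranges.length = 0 then 0
  else if stranges.length = 2 ∧ PySem.List.pyGetD stranges 0 0 + 1 ≠ PySem.List.pyGetD stranges 1 0 then -1
  else if stranges.length > 2 then -1
  else
    let newArr := PySem.List.slice arr (some (max (PySem.List.pyGetD stranges 0 0 - 2) 0))
        (some (min (PySem.List.pyGetD stranges (-1) 0 + 3) (arr.length : Int)))
    let answer := (PySem.List.pyRange 0 (newArr.length : Int) 1).foldl (fun acc i =>
      acc + isPossible (PySem.List.slice newArr none (some i) ++ PySem.List.slice newArr (some (i + 1)) none)) 0
    if answer = 0 then -1 else answer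

-- ===== PORT B =====
def isZigzagB (a : List Int) : Bool :=
  (a.zip ((PySem.List.slice a (some 1) none).zip (PySem.List.slice a (some 2) none))).all
    (fun t => (decide (t.1 < t.2.1) && decide (t.2.2 < t.2.1)) || (decide (t.2.1 < t.1) && decide (t.2.1 < t.2.2)))

def solution_alt (arr : List Int) : Int :=
  if isZigzagB arr then 0
  else
    let answer : Int :=
      ((PySem.List.pyRange 0 (arr.length : Int) 1).countP (fun i =>
        isZigzagB (PySem.List.slice arr none (some i) ++ PySem.List.slice arr (some (i + 1)) none)) : Int)
    if answer = 0 then -1 else answer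

-- ===== PRECONDITION & SPEC =====
def Spec_solution (arr : List Int) (out : Int) : Prop := out = solution_alt arr
instance (arr : List Int) (out : Int) : Decidable (Spec_solution arr out) := by unfold Spec_solution; infer_instance

-- ===== CLAIM (what is proved, stated in full; the proofs are below) =====
def Claim_equal_solution : Prop := ∀ (arr : List Int), Dom_solution arr → Spec_solution arr (solution arr)

-- ===== LEMMAS AND PROOFS =====
-- value at index, default 0 (all indices we reason about are in range)
def gv (a : List Int) (i : Nat) : Int := a.getD i 0
lemma getD_gv (a : List Int) (i : Nat) : a.getD i 0 = gv a i := rfl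
-- strict peak or valley, as Prop and as Bool
def Good (x y z : Int) : Prop := (x < y ∧ z < y) ∨ (y < x ∧ y < z)
def badb (x y z : Int) : Bool := !((decide (x < y) && decide (z < y)) || (decide (y < x) && decide (y < z)))
lemma badb_iff {x y z : Int} : badb x y z = true ↔ ¬ Good x y z := by
  simp [badb, Good]; omega
-- semantic zigzag predicate
def ZZ (a : List Int) : Prop := ∀ t, t + 2 < a.length → Good (gv a t) (gv a (t+1)) (gv a (t+2))
-- removal of index j
def rem (a : List Int) (j : Nat) : List Int := a.take j ++ a.drop (j+1)
-- indices of broken triples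
def bads (a : List Int) : List Nat :=
  (List.range (a.length - 2)).filter (fun t => badb (gv a t) (gv a (t+1)) (gv a (t+2)))

lemma mem_bads {a : List Int} {t : Nat} :
    t ∈ bads a ↔ t + 2 < a.length ∧ ¬ Good (gv a t) (gv a (t+1)) (gv a (t+2)) := by
  simp only [bads, List.mem_filter, List.mem_range, badb_iff]
  constructor
  · rintro ⟨h1, h2⟩; exact ⟨by omega, h2⟩
  · rintro ⟨h1, h2⟩; exact ⟨by omega, h2⟩

lemma length_rem {a : List Int} {j : Nat} (h : j < a.length) : (rem a j).length = a.length - 1 := by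
  simp [rem]; omega

lemma gv_rem {a : List Int} {j : Nat} (h : j < a.length) (t : Nat) :
    gv (rem a j) t = if t < j then gv a t else gv a (t+1) := by
  have hlt : (List.take j a).length = j := by simp; omega
  by_cases h' : t < j
  · simp [gv, rem, List.getD_eq_getElem?_getD, List.getElem?_append, hlt, h',
      List.getElem?_eq_getElem (show t < a.length by omega)]
  · have h2 : j + 1 + (t - j) = t + 1 := by omega
    simp [gv, rem, List.getD_eq_getElem?_getD, List.getElem?_append, hlt, h', List.getElem?_drop, h2]

lemma gv_rem_lt {a : List Int} {j t : Nat} (h : j < a.length) (ht : t < j) :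
    gv (rem a j) t = gv a t := by rw [gv_rem h, if_pos ht]

lemma gv_rem_ge {a : List Int} {j t : Nat} (h : j < a.length) (ht : j ≤ t) :
    gv (rem a j) t = gv a (t+1) := by rw [gv_rem h, if_neg (by omega)]

-- A's strange condition is exactly ¬Good
lemma cond_iff (x y z : Int) :
    (x = y ∨ getMark (x - y) * (-1) ≠ getMark (y - z)) ↔ ¬ Good x y z := by
  unfold getMark Good
  split_ifs <;> constructor <;> intro <;> omega

lemma goodb_iff {x y z : Int} : (!(badb x y z)) = true ↔ Good x y z := by
  simp [badb, Good]

lemma ZZ_short {a : List Int} (h : a.length < 3) : ZZ a := fun _ ht => absurd ht (by omega)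

lemma slice_two (l : List Int) : PySem.List.slice l (some 2) none = l.drop 2 := by
  have h := PySem.List.slice_from l (show (0:Int) ≤ 2 by norm_num)
  simpa using h

lemma zig_cons (x y z : Int) (r : List Int) :
    isZigzagB (x::y::z::r) = (!(badb x y z) && isZigzagB (y::z::r)) := by
  simp [isZigzagB, badb, PySem.List.slice_from_one, slice_two, Bool.not_not]

lemma zig_iff (a : List Int) : isZigzagB a = true ↔ ZZ a := by
  induction a with
  | nil => exact iff_of_true rfl (ZZ_short (by simp))
  | cons x l ih =>
    cases l with
    | nil => exact iff_of_true rfl (ZZ_short (by simp))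
    | cons y l2 =>
      cases l2 with
      | nil => exact iff_of_true rfl (ZZ_short (by simp))
      | cons z r =>
        rw [zig_cons]
        simp only [Bool.and_eq_true]
        rw [goodb_iff, ih]
        constructor
        · rintro ⟨h1, h2⟩ t ht
          cases t with
          | zero => simpa [gv] using h1
          | succ t => simpa [gv] using h2 t (by simp at ht ⊢; omega)
        · intro h
          refine ⟨by simpa [gv] using h 0 (by simp), fun t ht => by simpa [gv] using h (t+1) (by simp at ht ⊢; omega)⟩

lemma go_one {a : List Int} (h : ZZ a) :
    ∀ m c, a.length - 2 ≤ c + m → isPossibleGo a (PySem.List.pyRange c ((a.length:Int)-2) 1) = 1 := by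
  intro m
  induction m with
  | zero =>
    intro c hc
    rw [PySem.List.pyRange_one_eq_nil (by omega)]; rfl
  | succ m ih =>
    intro c hc
    by_cases hlt : (c:Int) < (a.length:Int) - 2
    · rw [PySem.List.pyRange_one_cons hlt]
      have hg := h c (by omega)
      have hnc := (not_iff_not.mpr (cond_iff (gv a c) (gv a (c+1)) (gv a (c+2)))).mpr (not_not_intro hg)
      push_neg at hnc
      show isPossibleGo a _ = 1
      rw [isPossibleGo]
      have e2 : (c:Int) + 1 = ((c+1 : Nat) : Int) := by push_cast; ring
      have e3 : (c:Int) + 2 = ((c+2 : Nat) : Int) := by push_cast; ring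
      simp only [e2, e3, PySem.List.pyGetD_natCast, getD_gv]
      rw [if_neg hnc.1, if_neg (not_not_intro hnc.2)]
      exact ih (c+1) (by omega)
    · rw [PySem.List.pyRange_one_eq_nil (by omega)]; rfl

lemma go_hits {a : List Int} {tb : Nat} (hb : tb + 2 < a.length)
    (hbad : ¬ Good (gv a tb) (gv a (tb+1)) (gv a (tb+2))) :
    ∀ m c, c ≤ tb → tb ≤ c + m → isPossibleGo a (PySem.List.pyRange c ((a.length:Int)-2) 1) = 0 := by
  intro m
  induction m with
  | zero =>
    intro c hc1 hc2
    have hceq : c = tb := by omega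
    subst hceq
    rw [PySem.List.pyRange_one_cons (by omega)]
    rw [isPossibleGo]
    have e2 : (c:Int) + 1 = ((c+1 : Nat) : Int) := by push_cast; ring
    have e3 : (c:Int) + 2 = ((c+2 : Nat) : Int) := by push_cast; ring
    simp only [e2, e3, PySem.List.pyGetD_natCast, getD_gv]
    have hd := (cond_iff (gv a c) (gv a (c+1)) (gv a (c+2))).mpr hbad
    rcases hd with hd | hd
    · rw [if_pos hd]
    · by_cases h1 : gv a c = gv a (c+1)
      · rw [if_pos h1]
      · rw [if_neg h1, if_pos hd]
  | succ m ih =>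
    intro c hc1 hc2
    by_cases hceq : c = tb
    · exact ih c hc1 (by omega)
    · rw [PySem.List.pyRange_one_cons (by omega)]
      rw [isPossibleGo]
      have e2 : (c:Int) + 1 = ((c+1 : Nat) : Int) := by push_cast; ring
      have e3 : (c:Int) + 2 = ((c+2 : Nat) : Int) := by push_cast; ring
      simp only [e2, e3, PySem.List.pyGetD_natCast, getD_gv]
      by_cases h1 : gv a c = gv a (c+1)
      · rw [if_pos h1]
      · rw [if_neg h1]
        by_cases h2 : getMark (gv a c - gv a (c+1)) * (-1) ≠ getMark (gv a (c+1) - gv a (c+2))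
        · rw [if_pos h2]
        · rw [if_neg h2]
          exact ih (c+1) (by omega) (by omega)

lemma ipos_one {a : List Int} (h : ZZ a) : isPossible a = 1 := by
  unfold isPossible
  by_cases hl : (a.length : Int) < 3
  · rw [if_pos hl]
  · rw [if_neg hl]
    have := go_one h a.length 0 (by omega)
    simpa using this

lemma ipos_zero {a : List Int} (h : ¬ ZZ a) : isPossible a = 0 := by
  unfold isPossible
  by_cases hl : (a.length : Int) < 3
  · exact absurd (ZZ_short (by omega)) h
  · rw [if_neg hl]
    unfold ZZ at h
    push_neg at h
    obtain ⟨t, ht, hbad⟩ := h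
    have := go_hits ht hbad t 0 (by omega) (by omega)
    simpa using this

lemma stranges_eq (arr : List Int) :
    (PySem.List.pyRange 0 ((arr.length : Int) - 2) 1).foldl (fun st i =>
      if PySem.List.pyGetD arr i 0 = PySem.List.pyGetD arr (i + 1) 0 then st ++ [i + 1]
      else if getMark (PySem.List.pyGetD arr i 0 - PySem.List.pyGetD arr (i + 1) 0) * (-1)
          ≠ getMark (PySem.List.pyGetD arr (i + 1) 0 - PySem.List.pyGetD arr (i + 2) 0) then st ++ [i + 1]
      else st) []
    = List.map (fun t : Nat => ((t : Int) + 1)) (bads arr) := by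
  rw [PySem.List.pyRange_one, List.foldl_map]
  have hn : (((arr.length : Int) - 2) - 0).toNat = arr.length - 2 := by omega
  rw [hn]
  have hfun : (fun (st : List Int) (k : Nat) =>
      if PySem.List.pyGetD arr ((0:Int) + k) 0 = PySem.List.pyGetD arr (((0:Int) + k) + 1) 0 then st ++ [((0:Int) + k) + 1]
      else if getMark (PySem.List.pyGetD arr ((0:Int) + k) 0 - PySem.List.pyGetD arr (((0:Int) + k) + 1) 0) * (-1)
          ≠ getMark (PySem.List.pyGetD arr (((0:Int) + k) + 1) 0 - PySem.List.pyGetD arr (((0:Int) + k) + 2) 0) then st ++ [((0:Int) + k) + 1]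
      else st)
      = (fun (st : List Int) (k : Nat) =>
        if badb (gv arr k) (gv arr (k+1)) (gv arr (k+2)) = true then st ++ [(k:Int) + 1] else st) := by
    funext st k
    have e2 : (0:Int) + (k:Nat) + 1 = ((k+1 : Nat) : Int) := by push_cast; ring
    have e3 : (0:Int) + (k:Nat) + 2 = ((k+2 : Nat) : Int) := by push_cast; ring
    have e1 : (0:Int) + (k:Nat) = ((k : Nat) : Int) := by push_cast; ring
    rw [e2, e3, e1]
    simp only [PySem.List.pyGetD_natCast, getD_gv]
    by_cases hg : Good (gv arr k) (gv arr (k+1)) (gv arr (k+2))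
    · have hnc := (not_iff_not.mpr (cond_iff (gv arr k) (gv arr (k+1)) (gv arr (k+2)))).mpr (not_not_intro hg)
      push_neg at hnc
      have hb : ¬ (badb (gv arr k) (gv arr (k+1)) (gv arr (k+2)) = true) := by
        rw [badb_iff]; exact not_not_intro hg
      rw [if_neg hnc.1, if_neg (not_not_intro hnc.2), if_neg hb]
    · have hd := (cond_iff _ _ _).mpr hg
      have hb : badb (gv arr k) (gv arr (k+1)) (gv arr (k+2)) = true := by
        rw [badb_iff]; exact hg
      rcases hd with hd | hd
      · rw [if_pos hd, if_pos hb]; simp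
      · by_cases h1 : gv arr k = gv arr (k+1)
        · rw [if_pos h1, if_pos hb]; simp
        · rw [if_neg h1, if_pos hd, if_pos hb]; simp
  rw [hfun, PySem.List.foldl_append_if (fun k => badb (gv arr k) (gv arr (k+1)) (gv arr (k+2)))
      (fun t => (t : Int) + 1)]
  rw [List.nil_append]
  rfl

lemma notZZ_far {a : List Int} {bt j : Nat} (hbt : bt + 2 < a.length)
    (hbad : ¬ Good (gv a bt) (gv a (bt+1)) (gv a (bt+2))) (hj : j < a.length)
    (hfar : j < bt ∨ bt + 2 < j) : ¬ ZZ (rem a j) := by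
  intro hz
  rcases hfar with hf | hf
  · have h1 := hz (bt-1) (by rw [length_rem hj]; omega)
    simp only [gv_rem hj] at h1
    rw [if_neg (by omega), if_neg (by omega), if_neg (by omega)] at h1
    rw [show bt - 1 + 1 = bt by omega] at h1
    rw [show bt - 1 + 2 + 1 = bt + 2 by omega] at h1
    exact hbad h1
  · have h1 := hz bt (by rw [length_rem hj]; omega)
    simp only [gv_rem hj] at h1
    rw [if_pos (by omega), if_pos (by omega), if_pos (by omega)] at h1
    exact hbad h1

lemma notZZ_mid {a : List Int} {t : Nat} (h4 : t + 4 < a.length)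
    (hb1 : ¬ Good (gv a t) (gv a (t+1)) (gv a (t+2)))
    (hb2 : ¬ Good (gv a (t+2)) (gv a (t+3)) (gv a (t+4))) : ¬ ZZ (rem a (t+2)) := by
  intro hz
  have hj : t + 2 < a.length := by omega
  have h1 := hz t (by rw [length_rem hj]; omega)
  have h2 := hz (t+1) (by rw [length_rem hj]; omega)
  simp only [gv_rem hj] at h1 h2
  rw [if_pos (by omega), if_pos (by omega), if_neg (by omega)] at h1
  rw [if_pos (by omega), if_neg (by omega), if_neg (by omega)] at h2
  rw [show t + 2 + 1 = t + 3 by omega] at h1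
  rw [show t + 1 + 1 + 1 = t + 3 by omega, show t + 1 + 2 + 1 = t + 4 by omega] at h2
  unfold Good at h1 h2 hb1 hb2
  omega

lemma all_fail_two {a : List Int} {t1 t2 : Nat} (h1 : t1 ∈ bads a) (h2 : t2 ∈ bads a)
    (hgap : t1 + 2 ≤ t2) : ∀ j, j < a.length → ¬ ZZ (rem a j) := by
  intro j hj
  rw [mem_bads] at h1 h2
  by_cases hf1 : j < t1 ∨ t1 + 2 < j
  · exact notZZ_far h1.1 h1.2 hj hf1
  · push_neg at hf1
    by_cases hf2 : j < t2 ∨ t2 + 2 < j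
    · exact notZZ_far h2.1 h2.2 hj hf2
    · push_neg at hf2
      have ht : t2 = t1 + 2 := by omega
      have hjt : j = t1 + 2 := by omega
      subst hjt
      rw [ht] at h2
      rw [show t1 + 2 + 1 = t1 + 3 by omega, show t1 + 2 + 2 = t1 + 4 by omega] at h2
      exact notZZ_mid h2.1 h1.2 h2.2

lemma gv_take_drop {a : List Int} {o m k : Nat} (hk : k < m) :
    gv ((a.drop o).take m) k = gv a (o + k) := by
  simp [gv, List.getD_eq_getElem?_getD, List.getElem?_take, hk, List.getElem?_drop]

lemma gv_rem_w {a : List Int} {o m k t : Nat} (hk : k < m) (ht : t + 1 < m) (hlen : o + m ≤ a.length) :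
    gv (rem ((a.drop o).take m) k) t = gv (rem a (o + k)) (o + t) := by
  have hw : ((a.drop o).take m).length = m := by simp; omega
  have hj : o + k < a.length := by omega
  rw [gv_rem (by rw [hw]; exact hk) t, gv_rem hj (o+t)]
  by_cases h' : t < k
  · rw [if_pos h', if_pos (by omega), gv_take_drop (by omega)]
  · rw [if_neg h', if_neg (by omega)]
    rw [show o + t + 1 = o + (t+1) by omega]
    exact gv_take_drop (by omega)

lemma win_out {a : List Int} {b e : Nat}
    (hmem : ∀ t, t ∈ bads a ↔ (t = b ∨ t = b + e)) :
    ∀ j, j < a.length → (j < b - 1 ∨ min (b+e+4) a.length ≤ j) → ¬ ZZ (rem a j) := by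
  intro j hj hout
  have hb := (mem_bads).mp ((hmem b).mpr (Or.inl rfl))
  exact notZZ_far hb.1 hb.2 hj (by omega)

lemma win_iff {a : List Int} {b e : Nat} (he : e ≤ 1)
    (hmem : ∀ t, t ∈ bads a ↔ (t = b ∨ t = b + e)) :
    ∀ k, k < min (b+e+4) a.length - (b-1) →
      (ZZ (rem ((a.drop (b-1)).take (min (b+e+4) a.length - (b-1))) k) ↔ ZZ (rem a ((b-1) + k))) := by
  intro k hk
  have hbadb := (mem_bads).mp ((hmem b).mpr (Or.inl rfl))
  have hbade := (mem_bads).mp ((hmem (b+e)).mpr (Or.inr rfl))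
  have hgood : ∀ t, t + 2 < a.length → t ≠ b → t ≠ b + e →
      Good (gv a t) (gv a (t+1)) (gv a (t+2)) := by
    intro t h1 h2 h3
    by_contra hng
    rcases (hmem t).mp (mem_bads.mpr ⟨h1, hng⟩) with h | h
    · exact h2 h
    · exact h3 h
  set n := a.length with hn
  have hlen : (b-1) + (min (b+e+4) n - (b-1)) ≤ n := by omega
  have hwl : ((a.drop (b-1)).take (min (b+e+4) n - (b-1))).length = min (b+e+4) n - (b-1) := by
    simp; omega
  have hjn : (b-1) + k < n := by omega
  by_cases hjr : (b-1) + k < b ∨ b + 2 < (b-1) + k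
  · -- removal misses the broken triple at b on both sides
    constructor
    · intro hz
      exfalso
      -- the broken triple of a at b sits at index b-(b-1) inside the window
      have hbw : ¬ Good (gv ((a.drop (b-1)).take (min (b+e+4) n - (b-1))) (b-(b-1)))
          (gv ((a.drop (b-1)).take (min (b+e+4) n - (b-1))) (b-(b-1)+1))
          (gv ((a.drop (b-1)).take (min (b+e+4) n - (b-1))) (b-(b-1)+2)) := by
        rw [gv_take_drop (by omega), gv_take_drop (by omega), gv_take_drop (by omega)]
        rw [show b-1 + (b-(b-1)) = b by omega, show b-1 + (b-(b-1)+1) = b+1 by omega,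
          show b-1 + (b-(b-1)+2) = b+2 by omega]
        exact hbadb.2
      have := notZZ_far (a := (a.drop (b-1)).take (min (b+e+4) n - (b-1)))
        (bt := b-(b-1)) (j := k) (by rw [hwl]; omega) hbw (by rw [hwl]; exact hk) (by omega)
      exact this hz
    · intro hz
      exact absurd hz (notZZ_far hbadb.1 hbadb.2 hjn hjr)
  · push_neg at hjr
    constructor
    · -- window zigzag after removal → whole array zigzag after removal
      intro hz t ht
      rw [length_rem hjn] at ht
      rw [gv_rem hjn t, gv_rem hjn (t+1), gv_rem hjn (t+2)]
      by_cases c1 : t + 2 < b - 1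
      · rw [if_pos (by omega), if_pos (by omega), if_pos (by omega)]
        exact hgood t (by omega) (by omega) (by omega)
      · by_cases c2 : t + 2 = b - 1
        · rw [if_pos (by omega), if_pos (by omega), if_pos (by omega)]
          exact hgood t (by omega) (by omega) (by omega)
        · by_cases c3 : t + 1 = b - 1
          · -- left junction
            by_cases hjgt : b < (b-1) + k
            · rw [if_pos (by omega), if_pos (by omega), if_pos (by omega)]
              exact hgood t (by omega) (by omega) (by omega)
            · -- j = b : removed exactly the left element of the broken triple
              have hjb : (b-1) + k = b := by omega
              have hb2 : 2 ≤ b := by omega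
              have et : t = b - 2 := by omega
              subst et
              rw [if_pos (by omega), if_pos (by omega), if_neg (by omega)]
              rw [show b-2+1 = b-1 by omega, show b-2+2+1 = b+1 by omega]
              have f1 : Good (gv a (b-2)) (gv a (b-1)) (gv a b) := by
                have h := hgood (b-2) (by omega) (by omega) (by omega)
                rwa [show b-2+1 = b-1 by omega, show b-2+2 = b by omega] at h
              have f2 : Good (gv a (b-1)) (gv a b) (gv a (b+1)) := by
                have h := hgood (b-1) (by omega) (by omega) (by omega)
                rwa [show b-1+1 = b by omega, show b-1+2 = b+1 by omega] at h
              have f3 := hbadb.2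
              have f4 : Good (gv a (b-1)) (gv a (b+1)) (gv a (b+2)) := by
                have g0 : gv (rem ((a.drop (b-1)).take (min (b+e+4) n - (b-1))) k) 0 = gv a (b-1) := by
                  rw [gv_rem_w hk (by omega) hlen, gv_rem_lt hjn (by omega)]
                  exact congrArg (gv a) (by omega)
                have g1 : gv (rem ((a.drop (b-1)).take (min (b+e+4) n - (b-1))) k) 1 = gv a (b+1) := by
                  rw [gv_rem_w hk (by omega) hlen, gv_rem_ge hjn (by omega)]
                  exact congrArg (gv a) (by omega)
                have g2 : gv (rem ((a.drop (b-1)).take (min (b+e+4) n - (b-1))) k) 2 = gv a (b+2) := by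
                  rw [gv_rem_w hk (by omega) hlen, gv_rem_ge hjn (by omega)]
                  exact congrArg (gv a) (by omega)
                have h := hz 0 (by rw [length_rem (by rw [hwl]; omega), hwl]; omega)
                simp only [Nat.zero_add] at h
                rwa [g0, g1, g2] at h
              unfold Good at f1 f2 f3 f4 ⊢
              omega
          · by_cases c4 : t + 2 ≤ min (b+e+4) n - 2
            · -- interior of the window
              have h := hz (t - (b-1)) (by rw [length_rem (by rw [hwl]; omega), hwl]; omega)
              rw [gv_rem_w hk (by omega) hlen, gv_rem_w hk (by omega) hlen,
                gv_rem_w hk (by omega) hlen] at h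
              rw [show (b-1) + (t-(b-1)) = t by omega, show (b-1) + (t-(b-1)+1) = t+1 by omega,
                show (b-1) + (t-(b-1)+2) = t+2 by omega] at h
              rw [gv_rem hjn, gv_rem hjn, gv_rem hjn] at h
              exact h
            · by_cases c5 : t + 2 = min (b+e+4) n - 1
              · -- right junction, one in from the edge
                by_cases hsub : (b-1) + k ≤ t
                · rw [if_neg (by omega), if_neg (by omega), if_neg (by omega)]
                  exact hgood (t+1) (by omega) (by omega) (by omega)
                · -- e = 0 and j = b+2
                  have he0 : e = 0 := by omega
                  subst he0
                  have hjb : (b-1) + k = b + 2 := by omega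
                  have et : t = b + 1 := by omega
                  subst et
                  rw [if_pos (by omega), if_neg (by omega), if_neg (by omega)]
                  rw [show b+1+1+1 = b+3 by omega, show b+1+2+1 = b+4 by omega]
                  have f1 : Good (gv a (b+1)) (gv a (b+2)) (gv a (b+3)) := by
                    have h := hgood (b+1) (by omega) (by omega) (by omega)
                    rwa [show b+1+1 = b+2 by omega, show b+1+2 = b+3 by omega] at h
                  have f2 : Good (gv a (b+2)) (gv a (b+3)) (gv a (b+4)) := by
                    have h := hgood (b+2) (by omega) (by omega) (by omega)
                    rwa [show b+2+1 = b+3 by omega, show b+2+2 = b+4 by omega] at h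
                  have f3 := hbadb.2
                  have f4 : Good (gv a b) (gv a (b+1)) (gv a (b+3)) := by
                    have g0 : gv (rem ((a.drop (b-1)).take (min (b+0+4) n - (b-1))) k) (b-(b-1)) = gv a b := by
                      rw [gv_rem_w hk (by omega) hlen, gv_rem_lt hjn (by omega)]
                      exact congrArg (gv a) (by omega)
                    have g1 : gv (rem ((a.drop (b-1)).take (min (b+0+4) n - (b-1))) k) (b-(b-1)+1) = gv a (b+1) := by
                      rw [gv_rem_w hk (by omega) hlen, gv_rem_lt hjn (by omega)]
                      exact congrArg (gv a) (by omega)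
                    have g2 : gv (rem ((a.drop (b-1)).take (min (b+0+4) n - (b-1))) k) (b-(b-1)+2) = gv a (b+3) := by
                      rw [gv_rem_w hk (by omega) hlen, gv_rem_ge hjn (by omega)]
                      exact congrArg (gv a) (by omega)
                    have h := hz (b - (b-1)) (by rw [length_rem (by rw [hwl]; omega), hwl]; omega)
                    rwa [g0, g1, g2] at h
                  unfold Good at f1 f2 f3 f4 ⊢
                  omega
              · -- fully to the right of the window
                rw [if_neg (by omega), if_neg (by omega), if_neg (by omega)]
                exact hgood (t+1) (by omega) (by omega) (by omega)
    · -- whole array zigzag after removal → window zigzag after removal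
      intro hz t ht
      rw [length_rem (by rw [hwl]; omega), hwl] at ht
      rw [gv_rem_w hk (by omega) hlen, gv_rem_w hk (by omega) hlen, gv_rem_w hk (by omega) hlen]
      exact hz ((b-1) + t) (by rw [length_rem hjn]; omega)

lemma zz_of_bads_nil {arr : List Int} (h : bads arr = []) : ZZ arr := by
  intro t ht
  by_contra hng
  have hm : t ∈ bads arr := mem_bads.mpr ⟨ht, hng⟩
  rw [h] at hm
  cases hm

lemma not_zz_of_mem {arr : List Int} {t : Nat} (h : t ∈ bads arr) : ¬ ZZ arr := by
  intro hz
  have hm := mem_bads.mp h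
  exact hm.2 (hz t hm.1)

lemma bads_pairwise (a : List Int) : (bads a).Pairwise (· < ·) :=
  List.Pairwise.filter _ List.pairwise_lt_range

lemma answer_eq (w : List Int) :
    (PySem.List.pyRange 0 (w.length : Int) 1).foldl (fun acc i =>
      acc + isPossible (PySem.List.slice w none (some i) ++ PySem.List.slice w (some (i + 1)) none)) 0
    = ((List.countP (fun t => isZigzagB (rem w t)) (List.range w.length) : Nat) : Int) := by
  rw [PySem.List.pyRange_one, List.foldl_map]
  have hn : (((w.length : Int)) - 0).toNat = w.length := by omega
  rw [hn]
  have hfun : (fun (acc : Int) (k : Nat) => acc +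
        isPossible (PySem.List.slice w none (some ((0:Int) + k)) ++ PySem.List.slice w (some (((0:Int) + k) + 1)) none))
      = fun acc k => if isZigzagB (rem w k) = true then acc + 1 else acc := by
    funext acc k
    have e1 : (0:Int) + (k:Int) = ((k:Nat):Int) := by push_cast; ring
    rw [e1, show (k:Int) + 1 = ((k+1:Nat):Int) by push_cast; ring,
      PySem.List.slice_to_natCast, PySem.List.slice_from_natCast]
    by_cases hzz : ZZ (rem w k)
    · rw [show (List.take k w ++ List.drop (k+1) w) = rem w k from rfl, ipos_one hzz,
        if_pos ((zig_iff _).mpr hzz)]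
    · rw [show (List.take k w ++ List.drop (k+1) w) = rem w k from rfl, ipos_zero hzz,
        if_neg (by rw [zig_iff]; exact hzz), add_zero]
  rw [hfun, PySem.List.foldl_count_if, zero_add]

lemma countB_eq (arr : List Int) :
    (PySem.List.pyRange 0 (arr.length : Int) 1).countP (fun i =>
      isZigzagB (PySem.List.slice arr none (some i) ++ PySem.List.slice arr (some (i + 1)) none))
    = List.countP (fun t => isZigzagB (rem arr t)) (List.range arr.length) := by
  rw [PySem.List.pyRange_one, List.countP_map]
  have hn : ((arr.length : Int) - 0).toNat = arr.length := by omega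
  rw [hn]
  apply List.countP_congr
  intro k _
  have e1 : (0:Int) + (k:Int) = ((k:Nat):Int) := by push_cast; ring
  simp only [Function.comp]
  rw [e1, show (k:Int) + 1 = ((k+1:Nat):Int) by push_cast; ring,
    PySem.List.slice_to_natCast, PySem.List.slice_from_natCast]
  exact Iff.rfl

lemma countP_window {P : Nat → Bool} {n off hi : Nat} (hoff : off ≤ hi) (hhi : hi ≤ n)
    (hout : ∀ j, j < n → (j < off ∨ hi ≤ j) → P j = false) :
    List.countP P (List.range n) = List.countP (fun k => P (off + k)) (List.range (hi - off)) := by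
  rw [show n = off + ((hi - off) + (n - hi)) by omega, List.range_add, List.range_add,
    List.map_append, List.countP_append, List.countP_append, List.countP_map, List.map_map,
    List.countP_map]
  have hz1 : List.countP P (List.range off) = 0 := by
    rw [List.countP_eq_zero]
    intro a ha
    rw [List.mem_range] at ha
    simp [hout a (by omega) (by omega)]
  have hz2 : List.countP (P ∘ (fun x => off + x) ∘ fun x => (hi - off) + x) (List.range (n - hi)) = 0 := by
    rw [List.countP_eq_zero]
    intro a ha
    rw [List.mem_range] at ha
    simp only [Function.comp_apply]
    simp [hout (off + ((hi - off) + a)) (by omega) (by omega)]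
  rw [hz1, hz2, Nat.zero_add, Nat.add_zero]
  rfl

lemma count_eq_window {arr : List Int} {b e : Nat} (he : e ≤ 1)
    (hmem : ∀ t, t ∈ bads arr ↔ (t = b ∨ t = b + e)) :
    List.countP (fun t => isZigzagB (rem ((arr.drop (b-1)).take (min (b+e+4) arr.length - (b-1))) t))
      (List.range ((arr.drop (b-1)).take (min (b+e+4) arr.length - (b-1))).length)
    = List.countP (fun t => isZigzagB (rem arr t)) (List.range arr.length) := by
  have hbm := mem_bads.mp ((hmem b).mpr (Or.inl rfl))
  have hwl : ((arr.drop (b-1)).take (min (b+e+4) arr.length - (b-1))).length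
      = min (b+e+4) arr.length - (b-1) := by simp; omega
  rw [hwl]
  rw [countP_window (P := fun t => isZigzagB (rem arr t)) (off := b-1)
    (hi := min (b+e+4) arr.length) (by omega) (by omega) ?hout]
  case hout =>
    intro j hj hcond
    cases hc : isZigzagB (rem arr j)
    · exact hc
    · exact absurd ((zig_iff _).mp hc) (win_out hmem j hj hcond)
  apply List.countP_congr
  intro k hk
  rw [List.mem_range] at hk
  constructor
  · intro h; rw [zig_iff] at h ⊢; exact (win_iff he hmem k hk).mp h
  · intro h; rw [zig_iff] at h ⊢; exact (win_iff he hmem k hk).mpr h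

theorem sol_eq (arr : List Int) : solution arr = solution_alt arr := by
  simp only [solution, solution_alt]
  rw [stranges_eq arr, countB_eq arr]
  rcases hbl : bads arr with _ | ⟨b, rest⟩
  · -- already a zigzag: both sides 0
    have hzz := zz_of_bads_nil hbl
    rw [if_pos ((zig_iff arr).mpr hzz)]
    simp
  · have hz : ¬ (isZigzagB arr = true) := by
      rw [zig_iff]
      exact not_zz_of_mem (show b ∈ bads arr by rw [hbl]; exact List.mem_cons_self ..)
    rw [if_neg hz]
    have hbm := mem_bads.mp (show b ∈ bads arr by rw [hbl]; exact List.mem_cons_self ..)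
    have hpw := bads_pairwise arr
    rw [hbl] at hpw
    rcases rest with _ | ⟨b2, rest2⟩
    · -- bads = [b]
      have hmem : ∀ t, t ∈ bads arr ↔ (t = b ∨ t = b + 0) := by intro t; rw [hbl]; simp
      simp only [List.map_cons, List.map_nil]
      rw [PySem.List.pyGetD_zero_cons, PySem.List.pyGetD_neg_one _ _ (by simp),
        List.getLast_singleton]
      rw [show max ((b:Int) + 1 - 2) 0 = ((b-1 : Nat) : Int) by push_cast; omega,
        show min ((b:Int) + 1 + 3) (arr.length : Int) = ((min (b+0+4) arr.length : Nat) : Int) by push_cast; omega,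
        PySem.List.slice_natCast, answer_eq, count_eq_window (show (0:Nat) ≤ 1 by omega) hmem]
      split_ifs <;> first | rfl | (exfalso; simp_all)
    · rcases rest2 with _ | ⟨b3, rest3⟩
      · by_cases hadj : b2 = b + 1
        · -- bads = [b, b+1] : adjacent pair, window case with e = 1
          subst hadj
          have hmem : ∀ t, t ∈ bads arr ↔ (t = b ∨ t = b + 1) := by intro t; rw [hbl]; simp
          simp only [List.map_cons, List.map_nil]
          rw [show ([((b:Int)+1), (((b+1:Nat):Int)+1)] : List Int)
              = [((b:Int)+1)] ++ [(((b+1:Nat):Int)+1)] from rfl,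
            PySem.List.pyGetD_neg_one_append_singleton, PySem.List.pyGetD_zero,
            show (List.getD ([((b:Int)+1)] ++ [(((b+1:Nat):Int)+1)]) 0 0) = (b:Int)+1 from rfl,
            PySem.List.pyGetD_ofNat',
            show (List.getD ([((b:Int)+1)] ++ [(((b+1:Nat):Int)+1)]) 1 0) = (((b+1:Nat):Int)+1) from rfl]
          rw [show max ((b:Int) + 1 - 2) 0 = ((b-1 : Nat) : Int) by push_cast; omega,
            show min ((((b+1:Nat):Int)+1) + 3) (arr.length : Int) = ((min (b+1+4) arr.length : Nat) : Int) by push_cast; omega,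
            PySem.List.slice_natCast, answer_eq, count_eq_window (show (1:Nat) ≤ 1 by omega) hmem]
          split_ifs <;> first | rfl |
            (exfalso
             simp only [List.length_append, List.length_cons, List.length_nil] at *
             push_cast at *
             try omega)
        · -- bads = [b, b2] with b2 not adjacent: both sides -1
          have hgap : b + 2 ≤ b2 := by
            rw [List.pairwise_cons] at hpw
            have := hpw.1 b2 (by simp)
            omega
          have hcnt : List.countP (fun t => isZigzagB (rem arr t)) (List.range arr.length) = 0 := by
            rw [List.countP_eq_zero]
            intro j hj
            rw [List.mem_range] at hj
            intro hc
            exact all_fail_two (show b ∈ bads arr by rw [hbl]; simp)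
              (show b2 ∈ bads arr by rw [hbl]; simp) hgap j hj ((zig_iff _).mp hc)
          simp only [List.map_cons, List.map_nil]
          rw [PySem.List.pyGetD_zero_cons, PySem.List.pyGetD_ofNat',
            show (List.getD [((b:Int)+1), ((b2:Int)+1)] 1 0) = (b2:Int)+1 from rfl]
          have hne : ((b:Int)+1) + 1 ≠ ((b2:Int)+1) := by
            intro hE; apply hadj; omega
          have h1x : ¬ (([((b:Int)+1), ((b2:Int)+1)] : List Int).length = 0) := by simp
          have h2x : (([((b:Int)+1), ((b2:Int)+1)] : List Int).length = 2 ∧ ((b:Int)+1) + 1 ≠ ((b2:Int)+1)) := ⟨by simp, hne⟩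
          rw [if_neg h1x, if_pos h2x, hcnt]
          simp
      · -- three or more broken triples: both sides -1
        have hgap : b + 2 ≤ b3 := by
          rw [List.pairwise_cons, List.pairwise_cons] at hpw
          have h12 := hpw.1 b2 (by simp)
          have h23 := hpw.2.1 b3 (by simp)
          omega
        have hcnt : List.countP (fun t => isZigzagB (rem arr t)) (List.range arr.length) = 0 := by
          rw [List.countP_eq_zero]
          intro j hj
          rw [List.mem_range] at hj
          intro hc
          exact all_fail_two (show b ∈ bads arr by rw [hbl]; simp)
            (show b3 ∈ bads arr by rw [hbl]; simp) hgap j hj ((zig_iff _).mp hc)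
        simp only [List.map_cons]
        rw [PySem.List.pyGetD_zero_cons, PySem.List.pyGetD_ofNat',
          show (List.getD (((b:Int)+1) :: ((b2:Int)+1) :: ((b3:Int)+1) :: List.map (fun t : Nat => ((t:Int)+1)) rest3) 1 0) = (b2:Int)+1 from rfl]
        have h1x : ¬ ((((b:Int)+1) :: ((b2:Int)+1) :: ((b3:Int)+1) :: List.map (fun t : Nat => ((t:Int)+1)) rest3).length = 0) := by simp
        have h2x : ¬ (((((b:Int)+1) :: ((b2:Int)+1) :: ((b3:Int)+1) :: List.map (fun t : Nat => ((t:Int)+1)) rest3).length = 2) ∧ ((b:Int)+1) + 1 ≠ ((b2:Int)+1)) := by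
          rintro ⟨hL, -⟩
          simp at hL
        have h3x : ((((b:Int)+1) :: ((b2:Int)+1) :: ((b3:Int)+1) :: List.map (fun t : Nat => ((t:Int)+1)) rest3).length > 2) := by
          simp
        rw [if_neg h1x, if_neg h2x, if_pos h3x, hcnt]
        simp

-- ===== VERDICT (by name: the statement is the Claim_ definition above) =====
theorem solution_spec : Claim_equal_solution := by
  intro arr _
  unfold Spec_solution
  exact sol_eq arr
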